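-- pv_equiv track=rewrite | github.com/PecherskyDaniil/pechersky_tppl | notation/notation/notation.py | is_prefix
-- ===== SOURCE A (Python) =====
-- operators=["+","-","/","*"]
--
-- def is_prefix(string: str) -> bool:
--     arr=string.split(" ")
--     opdigcounter=1
--     for i in range(len(arr)):
--         if arr[i] in operators:
--             opdigcounter+=1
--         else:
--             opdigcounter-=1
--         if opdigcounter<0:
--             return False
--     return True
-- ===== SOURCE B (Python) =====
-- def is_prefix(string: str) -> bool:
--     # Backward pass: compute the minimum prefix-sum of the +/-1 token deltas
--     # (min over all prefixes, empty prefix = 0) via the right-fold recurrence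
--     # M(d:rest) = min(0, d + M(rest)); valid iff 1 + that minimum stays >= 0.
--     m = 0
--     for tok in reversed(string.split(" ")):
--         d = 1 if tok in {"+", "-", "/", "*"} else -1
--         m = min(0, d + m)
--     return m >= -1
-- ===== Notes on version B (the rewrite author's own statement) =====
-- stated objective: alternative
-- what changed: Instead of A's forward loop with a running counter and early return, B makes a backward pass computing the minimum prefix-sum of the +/-1 token deltas via the right-fold recurrence m = min(0, d + m), and returns whether 1 + that minimum is non-negative.
import Mathlib
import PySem

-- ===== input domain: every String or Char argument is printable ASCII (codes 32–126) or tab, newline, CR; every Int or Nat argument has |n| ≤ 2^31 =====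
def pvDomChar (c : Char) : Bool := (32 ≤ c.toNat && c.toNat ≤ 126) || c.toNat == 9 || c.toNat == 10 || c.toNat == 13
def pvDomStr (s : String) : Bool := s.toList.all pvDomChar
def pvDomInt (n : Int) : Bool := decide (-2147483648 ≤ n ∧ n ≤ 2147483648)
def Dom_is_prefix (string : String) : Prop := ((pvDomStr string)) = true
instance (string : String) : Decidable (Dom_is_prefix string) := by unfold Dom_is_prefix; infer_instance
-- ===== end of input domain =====

-- B replaces A's forward counter loop with early return by a backward pass computing the
-- minimum prefix-sum of the token deltas (alternative decomposition, same O(n) cost).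
-- ===== PORT A =====
def operators : List String := ["+", "-", "/", "*"]

-- the for-loop of A: counter state, early `return False` when the counter goes negative
def isPrefixLoop : List String → Int → Bool
  | [], _ => true
  | t :: rest, c =>
    let c' := if t ∈ operators then c + 1 else c - 1
    if c' < 0 then false else isPrefixLoop rest c'

def is_prefix (string : String) : Bool :=
  isPrefixLoop ((PySem.Str.split? string " ").getD []) 1

-- ===== PORT B =====
def is_prefix_alt (string : String) : Bool :=
  let m := (((PySem.Str.split? string " ").getD []).reverse).foldl
    (fun m tok => min 0 ((if tok ∈ ["+", "-", "/", "*"] then (1 : Int) else -1) + m)) 0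
  decide (-1 ≤ m)

-- ===== PRECONDITION & SPEC =====
def Spec_is_prefix (string : String) (out : Bool) : Prop := out = is_prefix_alt string
instance (string : String) (out : Bool) : Decidable (Spec_is_prefix string out) := by unfold Spec_is_prefix; infer_instance

-- ===== CLAIM (what is proved, stated in full; the proofs are below) =====
def Claim_equal_is_prefix : Prop := ∀ (string : String), Dom_is_prefix string → Spec_is_prefix string (is_prefix string)

-- ===== LEMMAS AND PROOFS =====

-- the right-fold view of B's backward loop
def minPre (ts : List String) : Int :=
  ts.foldr (fun tok m => min 0 ((if tok ∈ ["+", "-", "/", "*"] then (1 : Int) else -1) + m)) 0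

lemma minPre_nonpos (ts : List String) : minPre ts ≤ 0 := by
  cases ts with
  | nil => simp [minPre]
  | cons t rest => simp [minPre]

lemma loop_eq_minPre (ts : List String) : ∀ c : Int, 0 ≤ c →
    isPrefixLoop ts c = decide (0 ≤ c + minPre ts) := by
  induction ts with
  | nil => intro c hc; simp [isPrefixLoop, minPre]; omega
  | cons t rest ih =>
    intro c hc
    have hrest := minPre_nonpos rest
    simp only [isPrefixLoop, operators]
    have hm : minPre (t :: rest) =
        min 0 ((if t ∈ ["+", "-", "/", "*"] then (1 : Int) else -1) + minPre rest) := rfl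
    by_cases hop : t ∈ ["+", "-", "/", "*"]
    · simp only [hop, if_true] at hm ⊢
      by_cases h : c + 1 < 0
      · omega
      · rw [if_neg h, ih _ (by omega), hm]
        have : (0 ≤ c + (1 + minPre rest)) ↔ (0 ≤ c + min 0 (1 + minPre rest)) := by omega
        simp only [decide_eq_decide]; omega
    · simp only [hop, if_false] at hm ⊢
      by_cases h : c - 1 < 0
      · rw [if_pos h, hm]
        have : ¬ (0 ≤ c + min 0 (-1 + minPre rest)) := by omega
        simp [this]
      · rw [if_neg h, ih _ (by omega), hm]
        simp only [decide_eq_decide]; omega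

lemma alt_eq_minPre (string : String) :
    is_prefix_alt string = decide (-1 ≤ minPre ((PySem.Str.split? string " ").getD [])) := by
  unfold is_prefix_alt
  rw [List.foldl_reverse]
  rfl

-- ===== VERDICT (by name: the statement is the Claim_ definition above) =====
theorem is_prefix_spec : Claim_equal_is_prefix := by
  intro string _
  unfold Spec_is_prefix is_prefix
  rw [alt_eq_minPre, loop_eq_minPre _ 1 (by omega)]
  simp only [decide_eq_decide]; omega
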